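-- pv_equiv track=rewrite | github.com/Rahulnisanth/Complete-Python-Hub | CompetitiveCodings/HackSussex.py | numberRectangles
-- ===== SOURCE A (Python) =====
-- def numberRectangles(rectangles : list[list[int]]) -> int :
--     sideOfSquares = []
--     for i in range(len(rectangles)):
--         sideOfSquares.append(min(rectangles[i]))
--
--     maxNumberOfRectangles = 0
--     for i in range(len(rectangles)):
--         maxNumberOfRectangles += rectangles[i].count(max(sideOfSquares)) if min(rectangles[i]) == max(sideOfSquares) else 0
--     return maxNumberOfRectangles
-- ===== SOURCE B (Python) =====
-- def numberRectangles(rectangles):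
--     best = None
--     total = 0
--     for r in rectangles:
--         m = min(r)
--         if best is None or m > best:
--             best = m
--             total = r.count(m)
--         elif m == best:
--             total += r.count(m)
--     return total
-- ===== Notes on version B (the rewrite author's own statement) =====
-- stated objective: faster
-- what changed: B replaces A's two passes (build the list of per-rectangle mins, then a second loop that recomputes max(sideOfSquares) on every iteration) with a single streaming pass that keeps the best min side seen so far and a running count, resetting the count when a larger min appears.
-- outside the precondition, e.g. on numberRectangles([[2, 3], []]): A raises ValueError, B raises ValueError
import Mathlib
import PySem

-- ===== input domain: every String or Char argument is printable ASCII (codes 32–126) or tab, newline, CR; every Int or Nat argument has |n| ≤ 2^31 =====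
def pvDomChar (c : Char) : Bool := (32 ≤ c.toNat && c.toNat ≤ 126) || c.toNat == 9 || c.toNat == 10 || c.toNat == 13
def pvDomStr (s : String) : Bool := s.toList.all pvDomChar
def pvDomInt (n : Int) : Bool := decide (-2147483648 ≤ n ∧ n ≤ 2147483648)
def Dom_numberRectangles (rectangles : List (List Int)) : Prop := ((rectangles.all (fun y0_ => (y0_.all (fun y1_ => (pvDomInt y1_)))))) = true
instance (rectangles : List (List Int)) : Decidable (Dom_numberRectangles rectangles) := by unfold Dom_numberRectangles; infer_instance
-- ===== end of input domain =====

-- B replaces A's two index loops (the second of which recomputes max(sideOfSquares) each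
-- iteration) with a single streaming pass keeping the best min side and a running count.

-- ===== PORT A =====
def numberRectangles (rectangles : List (List Int)) : Int :=
  let sideOfSquares :=
    (PySem.List.pyRange 0 (rectangles.length : Int) 1).foldl
      (fun acc i =>
        acc ++ [(PySem.List.min? (PySem.List.pyGetD rectangles i []) (fun x => x)).getD 0]) []
  (PySem.List.pyRange 0 (rectangles.length : Int) 1).foldl
    (fun acc i =>
      acc +
        (if (PySem.List.min? (PySem.List.pyGetD rectangles i []) (fun x => x)).getD 0
              = (PySem.List.max? sideOfSquares (fun x => x)).getD 0 then
           (PySem.List.count (PySem.List.pyGetD rectangles i [])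
              ((PySem.List.max? sideOfSquares (fun x => x)).getD 0) : Int)
         else 0)) 0

-- ===== PORT B =====
def numberRectangles_alt (rectangles : List (List Int)) : Int :=
  (rectangles.foldl
    (fun (st : Option Int × Int) r =>
      let m := (PySem.List.min? r (fun x => x)).getD 0
      match st.1 with
      | none => (some m, (PySem.List.count r m : Int))
      | some b =>
        if b < m then (some m, (PySem.List.count r m : Int))
        else if m = b then (some b, st.2 + (PySem.List.count r m : Int))
        else st)
    ((none : Option Int), (0 : Int))).2

-- ===== PRECONDITION & SPEC =====
-- Pre_ excludes inputs containing an empty rectangle, on which A (and B) raise ValueError from taking the min of that rectangle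
-- (the proved equivalence does not need this hypothesis; Pre_ only marks where the Python programs raise).
def Pre_numberRectangles (rectangles : List (List Int)) : Prop :=
  ∀ r ∈ rectangles, r ≠ []
instance (rectangles : List (List Int)) : Decidable (Pre_numberRectangles rectangles) := by
  unfold Pre_numberRectangles; infer_instance
def pvWitness_numberRectangles : List (List Int) := [[2, 3], [3, 5], [1, 7]]

def Spec_numberRectangles (rectangles : List (List Int)) (out : Int) : Prop := out = numberRectangles_alt rectangles
instance (rectangles : List (List Int)) (out : Int) : Decidable (Spec_numberRectangles rectangles out) := by unfold Spec_numberRectangles; infer_instance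

-- ===== CLAIM (what is proved, stated in full; the proofs are below) =====
def Claim_equal_numberRectangles : Prop := ∀ (rectangles : List (List Int)), Dom_numberRectangles rectangles → Pre_numberRectangles rectangles → Spec_numberRectangles rectangles (numberRectangles rectangles)

-- ===== LEMMAS AND PROOFS =====

-- the min side of a rectangle, as both ports compute it
def pvFm (r : List Int) : Int := (PySem.List.min? r (fun x => x)).getD 0

-- B's loop body
def pvStep (st : Option Int × Int) (r : List Int) : Option Int × Int :=
  let m := pvFm r
  match st.1 with
  | none => (some m, (PySem.List.count r m : Int))
  | some b =>
    if b < m then (some m, (PySem.List.count r m : Int))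
    else if m = b then (some b, st.2 + (PySem.List.count r m : Int))
    else st

-- A's answer in closed form, given the global max M
def pvSum (l : List (List Int)) (M : Int) : Int :=
  (l.map (fun r => if pvFm r = M then (PySem.List.count r M : Int) else 0)).sum

-- invariant of B's fold from a live state (some b, c)
lemma pvFold_some (l : List (List Int)) :
    ∀ (b c : Int),
      l.foldl pvStep (some b, c) =
        (some ((l.map pvFm).foldl max b),
         (if b = (l.map pvFm).foldl max b then c else 0)
           + pvSum l ((l.map pvFm).foldl max b)) := by
  induction l with
  | nil => intro b c; simp [pvSum]
  | cons r t ih =>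
    intro b c
    simp only [List.foldl_cons, List.map_cons]
    have hsum : ∀ M, pvSum (r :: t) M =
        (if pvFm r = M then (PySem.List.count r M : Int) else 0) + pvSum t M := by
      intro M; simp [pvSum]
    rcases lt_trichotomy b (pvFm r) with h | h | h
    · rw [show pvStep (some b, c) r = (some (pvFm r), (PySem.List.count r (pvFm r) : Int)) by
        simp [pvStep, h]]
      rw [ih]
      have hmax : (t.map pvFm).foldl max (max b (pvFm r)) = (t.map pvFm).foldl max (pvFm r) := by
        rw [max_eq_right h.le]
      have hle : pvFm r ≤ (t.map pvFm).foldl max (pvFm r) :=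
        (PySem.List.le_foldl_max (t.map pvFm) (pvFm r)).1
      have hb : b ≠ (t.map pvFm).foldl max (pvFm r) := by
        intro he; exact absurd (he ▸ (lt_of_lt_of_le h hle)) (lt_irrefl _)
      simp only [hmax, Prod.mk.injEq]
      refine ⟨trivial, ?_⟩
      rw [hsum, if_neg hb]
      by_cases hr : pvFm r = (t.map pvFm).foldl max (pvFm r)
      · rw [if_pos hr, ← hr]
        simp only [if_true]
        try ring
      · rw [if_neg hr]
        try rw [if_neg hr]
        try ring
    · rw [show pvStep (some b, c) r = (some b, c + (PySem.List.count r (pvFm r) : Int)) by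
        simp [pvStep, h]]
      rw [ih]
      have hmax : (t.map pvFm).foldl max (max b (pvFm r)) = (t.map pvFm).foldl max b := by
        rw [h, max_self]
      simp only [hmax, Prod.mk.injEq]
      refine ⟨trivial, ?_⟩
      rw [hsum]
      by_cases hb : b = (t.map pvFm).foldl max b
      · rw [if_pos hb]
        try rw [if_pos hb]
        rw [if_pos (h ▸ hb : pvFm r = (t.map pvFm).foldl max b)]
        rw [← (h ▸ hb : pvFm r = (t.map pvFm).foldl max b)]
        try ring
      · rw [if_neg hb]
        try rw [if_neg hb]
        rw [if_neg (fun he : pvFm r = (t.map pvFm).foldl max b => hb (h.trans he))]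
        try ring
    · rw [show pvStep (some b, c) r = (some b, c) by
        simp only [pvStep]
        rw [if_neg (by omega), if_neg (by omega)]]
      rw [ih]
      have hmax : (t.map pvFm).foldl max (max b (pvFm r)) = (t.map pvFm).foldl max b := by
        rw [max_eq_left h.le]
      have hble : b ≤ (t.map pvFm).foldl max b :=
        (PySem.List.le_foldl_max (t.map pvFm) b).1
      simp only [hmax, Prod.mk.injEq]
      refine ⟨trivial, ?_⟩
      rw [hsum]
      rw [if_neg (fun he : pvFm r = (t.map pvFm).foldl max b => absurd (lt_of_lt_of_le h (he ▸ hble)) (lt_irrefl _))]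
      ring

lemma pvAlt_eq (rectangles : List (List Int)) :
    numberRectangles_alt rectangles =
      match rectangles with
      | [] => 0
      | x :: t => pvSum (x :: t) (((x :: t).map pvFm).foldl max (pvFm x)) := by
  cases rectangles with
  | nil => rfl
  | cons x t =>
    show numberRectangles_alt (x :: t) = pvSum (x :: t) (((x :: t).map pvFm).foldl max (pvFm x))
    have hfold : numberRectangles_alt (x :: t) = ((x :: t).foldl pvStep (none, 0)).2 := rfl
    rw [hfold]
    simp only [List.foldl_cons]
    rw [show pvStep ((none : Option Int), (0 : Int)) x
          = (some (pvFm x), (PySem.List.count x (pvFm x) : Int)) from rfl]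
    rw [pvFold_some]
    simp only [List.map_cons, List.foldl_cons, max_self]
    have hs : pvSum (x :: t) ((t.map pvFm).foldl max (pvFm x)) =
        (if pvFm x = (t.map pvFm).foldl max (pvFm x) then
           (PySem.List.count x ((t.map pvFm).foldl max (pvFm x)) : Int) else 0)
          + pvSum t ((t.map pvFm).foldl max (pvFm x)) := by
      simp [pvSum]
    rw [hs]
    by_cases hx : pvFm x = (t.map pvFm).foldl max (pvFm x)
    · rw [if_pos hx, ← hx]
      simp only [if_true]
      try ring
    · rw [if_neg hx]
      try rw [if_neg hx]
      try ring

lemma pvA_eq (rectangles : List (List Int)) :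
    numberRectangles rectangles =
      pvSum rectangles ((PySem.List.max? (rectangles.map pvFm) (fun x => x)).getD 0) := by
  simp only [numberRectangles]
  rw [PySem.List.foldl_pyRange_zero_pyGetD' rectangles ([] : List Int)
    (fun acc r => acc ++ [(PySem.List.min? r (fun x => x)).getD 0]) []]
  rw [PySem.List.foldl_append_singleton_eq_map, List.nil_append]
  rw [PySem.List.foldl_pyRange_zero_pyGetD' rectangles ([] : List Int)
    (fun acc r => acc +
      (if (PySem.List.min? r (fun x => x)).getD 0
            = (PySem.List.max? (rectangles.map fun r => (PySem.List.min? r (fun x => x)).getD 0)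
                (fun x => x)).getD 0 then
         (PySem.List.count r
            ((PySem.List.max? (rectangles.map fun r => (PySem.List.min? r (fun x => x)).getD 0)
                (fun x => x)).getD 0) : Int)
       else 0)) 0]
  rw [PySem.List.foldl_add]
  simp only [zero_add]
  rfl

-- ===== VERDICT (by name: the statement is the Claim_ definition above) =====
theorem numberRectangles_spec : Claim_equal_numberRectangles := by
  intro rectangles _ _
  unfold Spec_numberRectangles
  rw [pvA_eq, pvAlt_eq]
  cases rectangles with
  | nil => simp [pvSum]
  | cons x t =>
    simp only [List.map_cons]
    rw [PySem.List.max?_id_cons]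
    simp only [Option.getD_some]
    rw [show (pvFm x :: t.map pvFm).foldl max (pvFm x) = (t.map pvFm).foldl max (pvFm x) by
      simp [max_self]]
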